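-- pv_equiv track=rewrite | github.com/shhuan1989/algorithms | codeforces/1360H.py | solve
-- ===== SOURCE A (Python) =====
-- def solve(bits, remove):
--     lo, hi = 0, (1 << bits) - 1
--     half = ((1 << bits) - len(remove) + 1) // 2
--     while lo <= hi:
--         m = (lo + hi) // 2
--         # how many vals <= m
--         left = m + 1 - len([v for v in remove if v <= m])
--         if left == half:
--             while m >= 0:
--                 if m not in remove:
--                     return m
--                 m -= 1
--             return m
--         elif left > half:
--             hi = m - 1
--         else:
--             lo = m + 1
--
--     return 0
-- ===== SOURCE B (Python) =====
-- def _bisect_right(a, x):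
--     # stdlib bisect.bisect_right, hand-written (A imports nothing)
--     lo, hi = 0, len(a)
--     while lo < hi:
--         mid = (lo + hi) // 2
--         if x < a[mid]:
--             hi = mid
--         else:
--             lo = mid + 1
--     return lo
--
--
-- def _search(ranks, half, lo, hi):
--     # binary search for the value m whose rank (m+1 minus removed entries <= m,
--     # read off the pre-sorted list by one bisect) equals half; None if no hit
--     while True:
--         if lo > hi:
--             return None
--         m = lo + (hi - lo) // 2
--         left = m + 1 - _bisect_right(ranks, m)
--         if left == half:
--             return m
--         if left > half:
--             hi = m - 1
--         else:
--             lo = m + 1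
--
--
-- def solve(bits, remove):
--     total = 1 << bits
--     half = (total - len(remove) + 1) // 2
--     ranks = sorted(remove)            # duplicates kept: rank counts entries, like A
--     dst = sorted(set(remove))         # strictly increasing distinct values
--     m = _search(ranks, half, 0, total - 1)
--     if m is None:
--         return 0
--     # walk down the strictly increasing array while it matches consecutive values
--     j = _bisect_right(dst, m)
--     while m >= 0 and j > 0 and dst[j - 1] == m:
--         m -= 1
--         j -= 1
--     return m
-- ===== Notes on version B (the rewrite author's own statement) =====
-- stated objective: faster
-- what changed: A's per-iteration O(n) list scan for the rank and its O(n) 'm in remove' membership descent are replaced by a one-time sort (with duplicates) plus a sorted distinct array: the rank is one bisect, the search is a separate function returning the hit (or None) and the final descent walks the strictly increasing distinct array downward instead of testing list membership per step.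
import Mathlib
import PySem

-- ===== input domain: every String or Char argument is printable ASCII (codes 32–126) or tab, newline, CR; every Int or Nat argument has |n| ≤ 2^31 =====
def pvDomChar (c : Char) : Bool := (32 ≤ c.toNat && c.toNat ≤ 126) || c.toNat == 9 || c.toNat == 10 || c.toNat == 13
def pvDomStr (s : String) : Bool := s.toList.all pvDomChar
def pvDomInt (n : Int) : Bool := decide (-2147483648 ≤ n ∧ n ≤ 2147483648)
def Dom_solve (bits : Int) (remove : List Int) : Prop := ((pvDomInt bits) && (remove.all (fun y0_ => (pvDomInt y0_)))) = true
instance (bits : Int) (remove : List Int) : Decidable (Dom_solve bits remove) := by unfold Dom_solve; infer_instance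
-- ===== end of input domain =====

-- B replaces A's per-iteration O(n) scans by one sort + bisect ranks, a recursive Option-returning search, and a downward walk over the sorted distinct array (faster).


-- ===== PORT A =====
-- the inner 'while m >= 0: if m not in remove: return m; m -= 1; return m'
def pyDescend (remove : List Int) (m : Int) : Int :=
  if _h : 0 ≤ m then
    if m ∈ remove then pyDescend remove (m - 1) else m
  else m
termination_by (m + 1).toNat
decreasing_by omega

-- the 'while lo <= hi' binary search; left counts with a fresh scan of remove each time
def pyLoop (remove : List Int) (half lo hi : Int) : Int :=
  if h : lo ≤ hi then
    let m := PySem.Int.floordiv (lo + hi) 2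
    let left := m + 1 - ((remove.filter (fun v => v ≤ m)).length : Int)
    if left = half then pyDescend remove m
    else if left > half then pyLoop remove half lo (m - 1)
    else pyLoop remove half (m + 1) hi
  else 0
termination_by (hi - lo + 1).toNat
decreasing_by
  · have hb := PySem.Int.floordiv_two_mid_bounds h; omega
  · have hb := PySem.Int.floordiv_two_mid_bounds h; omega

-- 1 << bits is 2 ^ bits for bits ≥ 0 (Pre_solve); Python raises on bits < 0
def solve (bits : Int) (remove : List Int) : Int :=
  pyLoop remove (PySem.Int.floordiv ((2 : Int) ^ bits.toNat - (remove.length : Int) + 1) 2)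
    0 ((2 : Int) ^ bits.toNat - 1)

-- ===== PORT B =====
-- Source B's _bisect_right is verbatim stdlib bisect_right, ported as PySem.List.bisectRight (the prelude's primitive).
-- '_search': the while-loop binary search returning the hit (some m) or none; midpoint written lo + (hi-lo)//2
def altSearch (ranks : List Int) (half lo hi : Int) : Option Int :=
  if h : lo > hi then none
  else
    let m := lo + PySem.Int.floordiv (hi - lo) 2
    let left := m + 1 - (PySem.List.bisectRight ranks m : Int)
    if left = half then some m
    else if left > half then altSearch ranks half lo (m - 1)
    else altSearch ranks half (m + 1) hi
termination_by (hi - lo + 1).toNat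
decreasing_by
  · rw [PySem.Int.floordiv_eq_ediv_of_pos (by omega)]; omega
  · rw [PySem.Int.floordiv_eq_ediv_of_pos (by omega)]; omega

-- the final 'while m >= 0 and j > 0 and dst[j-1] == m' walk; dst[j-1] read with pyGet?
-- (the j > 0 guard keeps the Python index in range, so pyGet? is always some here)
def altWalk (dst : List Int) (m j : Int) : Int :=
  if _h : 0 ≤ m ∧ 0 < j ∧ PySem.List.pyGet? dst (j - 1) = some m then
    altWalk dst (m - 1) (j - 1)
  else m
termination_by (m + 1).toNat
decreasing_by omega

def solve_alt (bits : Int) (remove : List Int) : Int :=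
  let total : Int := 2 ^ bits.toNat
  let half := PySem.Int.floordiv (total - (remove.length : Int) + 1) 2
  let ranks := PySem.List.sorted remove (fun x => x)
  let dst := PySem.List.sorted (PySem.Set.ofList remove) (fun x => x)
  match altSearch ranks half 0 (total - 1) with
  | none => 0
  | some m => altWalk dst m (PySem.List.bisectRight dst m)

-- ===== PRECONDITION & SPEC =====
-- Pre_ excludes only bits < 0, where Python's '1 << bits' raises ValueError in both A and B.
def Pre_solve (bits : Int) (remove : List Int) : Prop := 0 ≤ bits
instance (bits : Int) (remove : List Int) : Decidable (Pre_solve bits remove) := by unfold Pre_solve; infer_instance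
def pvWitness_solve : Int × List Int := (2, [1, 3])

def Spec_solve (bits : Int) (remove : List Int) (out : Int) : Prop := out = solve_alt bits remove
instance (bits : Int) (remove : List Int) (out : Int) : Decidable (Spec_solve bits remove out) := by unfold Spec_solve; infer_instance

-- ===== CLAIM (what is proved, stated in full; the proofs are below) =====
def Claim_equal_solve : Prop := ∀ (bits : Int) (remove : List Int), Dom_solve bits remove → Pre_solve bits remove → Spec_solve bits remove (solve bits remove)

-- ===== LEMMAS AND PROOFS =====

-- both midpoint formulas agree: (lo+hi)//2 = lo + (hi-lo)//2
theorem mid_eq (lo hi : Int) :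
    PySem.Int.floordiv (lo + hi) 2 = lo + PySem.Int.floordiv (hi - lo) 2 := by
  rw [PySem.Int.floordiv_eq_ediv_of_pos (by omega), PySem.Int.floordiv_eq_ediv_of_pos (by omega)]
  omega

-- bisect_right on sorted(remove) is exactly A's scan count |{v in remove : v ≤ m}|
theorem bisect_count (remove : List Int) (m : Int) :
    (PySem.List.bisectRight (PySem.List.sorted remove (fun x => x)) m : Int)
      = ((remove.filter (fun v => v ≤ m)).length : Int) := by
  have hp : (PySem.List.sorted remove (fun x => x)).Pairwise (fun a b => a ≤ b) :=
    PySem.List.sorted_pairwise remove (fun x => x)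
  obtain ⟨hle, hbelow, habove⟩ :=
    PySem.List.bisectRight_spec (PySem.List.sorted remove (fun x => x)) m hp
  have hperm : (remove.filter (fun v => decide (v ≤ m))).length
      = ((PySem.List.sorted remove (fun x => x)).filter (fun v => decide (v ≤ m))).length :=
    (((PySem.List.sorted_perm remove (fun x => x) false).filter _).length_eq).symm
  have hcount : ((PySem.List.sorted remove (fun x => x)).filter (fun v => decide (v ≤ m))).length
      = PySem.List.bisectRight (PySem.List.sorted remove (fun x => x)) m := by
    set srt := PySem.List.sorted remove (fun x => x) with hsrt
    set c := PySem.List.bisectRight srt m with hc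
    rw [← List.countP_eq_length_filter]
    conv_lhs => rw [← List.take_append_drop c srt]
    rw [List.countP_append]
    have htake : List.countP (fun v => decide (v ≤ m)) (srt.take c) = (srt.take c).length := by
      apply List.countP_eq_length.mpr
      intro a ha
      obtain ⟨i, hi, rfl⟩ := List.mem_iff_getElem.mp ha
      have hic : i < c := lt_of_lt_of_le hi (by simp [List.length_take])
      have hisrt : i < srt.length := lt_of_lt_of_le hi (by simp)
      rw [List.getElem_take]
      exact decide_eq_true (hbelow i hisrt hic)
    have hdrop : List.countP (fun v => decide (v ≤ m)) (srt.drop c) = 0 := by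
      apply List.countP_eq_zero.mpr
      intro a ha
      obtain ⟨i, hi, rfl⟩ := List.mem_iff_getElem.mp ha
      rw [List.getElem_drop]
      have hci : c + i < srt.length := by simp at hi; omega
      have := habove (c + i) hci (Nat.le_add_right c i)
      simp only [decide_eq_true_eq]
      omega
    rw [htake, hdrop, List.length_take, Nat.min_eq_left hle, Nat.add_zero]
  rw [show (remove.filter (fun v => v ≤ m)) = (remove.filter (fun v => decide (v ≤ m))) from rfl]
  rw [hperm, hcount]

-- when m is in a strictly increasing list, bisect_right points one past its unique occurrence
theorem bisect_mem_pt (dst : List Int) (hlt : dst.Pairwise (· < ·)) (m : Int) (hm : m ∈ dst) :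
    0 < PySem.List.bisectRight dst m ∧
    ∀ _h : PySem.List.bisectRight dst m - 1 < dst.length,
      dst[PySem.List.bisectRight dst m - 1] = m := by
  have hple : dst.Pairwise (· ≤ ·) := hlt.imp (fun h => le_of_lt h)
  obtain ⟨hle, hbelow, habove⟩ := PySem.List.bisectRight_spec dst m hple
  obtain ⟨i, hi, hieq⟩ := List.mem_iff_getElem.mp hm
  have hij : i < PySem.List.bisectRight dst m := by
    by_contra hc
    have := habove i hi (by omega)
    omega
  refine ⟨by omega, fun hjl => ?_⟩
  have hmono := List.pairwise_iff_getElem.mp hlt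
  have h1 : dst[PySem.List.bisectRight dst m - 1] ≤ m := hbelow _ hjl (by omega)
  by_cases hij1 : i = PySem.List.bisectRight dst m - 1
  · subst hij1; omega
  · have : dst[i] < dst[PySem.List.bisectRight dst m - 1] := hmono i _ hi hjl (by omega)
    omega

-- stepping down: removing the unique occurrence of m shifts bisect_right by one
theorem bisect_pred_pt (dst : List Int) (hlt : dst.Pairwise (· < ·)) (m : Int) (hm : m ∈ dst) :
    PySem.List.bisectRight dst (m - 1) = PySem.List.bisectRight dst m - 1 := by
  have hple : dst.Pairwise (· ≤ ·) := hlt.imp (fun h => le_of_lt h)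
  obtain ⟨hle, hbelow, habove⟩ := PySem.List.bisectRight_spec dst m hple
  obtain ⟨hle', hbelow', habove'⟩ := PySem.List.bisectRight_spec dst (m - 1) hple
  obtain ⟨hjpos, hval⟩ := bisect_mem_pt dst hlt m hm
  have hjl : PySem.List.bisectRight dst m - 1 < dst.length := by omega
  have hvm : dst[PySem.List.bisectRight dst m - 1] = m := hval hjl
  have hmono := List.pairwise_iff_getElem.mp hlt
  have hcle : PySem.List.bisectRight dst (m - 1) ≤ PySem.List.bisectRight dst m - 1 := by
    by_contra hcc
    have := hbelow' _ hjl (by omega)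
    omega
  have hcge : PySem.List.bisectRight dst m - 1 ≤ PySem.List.bisectRight dst (m - 1) := by
    by_contra hcc
    have hcl : PySem.List.bisectRight dst (m - 1) < dst.length := by omega
    have h1 : m - 1 < dst[PySem.List.bisectRight dst (m - 1)] :=
      habove' _ hcl (le_refl _)
    have h2 : dst[PySem.List.bisectRight dst (m - 1)] < dst[PySem.List.bisectRight dst m - 1] :=
      hmono _ _ hcl hjl (by omega)
    omega
  omega

-- A's membership descent equals B's cursor walk over any strictly increasing list with the same members
theorem walk_eq (remove : List Int) (dst : List Int) (hlt : dst.Pairwise (· < ·))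
    (hmem : ∀ x : Int, x ∈ dst ↔ x ∈ remove) (m : Int) :
    pyDescend remove m = altWalk dst m (PySem.List.bisectRight dst m) := by
  fun_induction pyDescend remove m with
  | case1 m h0 hm ih =>
      obtain ⟨hjpos, hval⟩ := bisect_mem_pt dst hlt m ((hmem m).mpr hm)
      have hjl : PySem.List.bisectRight dst m - 1 < dst.length := by
        have := PySem.List.bisectRight_spec dst m (hlt.imp (fun h => le_of_lt h))
        omega
      have hcast : ((PySem.List.bisectRight dst m : Int)) - 1
          = ((PySem.List.bisectRight dst m - 1 : Nat) : Int) := by omega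
      have hget : PySem.List.pyGet? dst ((PySem.List.bisectRight dst m : Int) - 1)
          = some m := by
        rw [hcast, PySem.List.pyGet?_natCast, List.getElem?_eq_getElem hjl, hval hjl]
      rw [altWalk, dif_pos ⟨h0, by exact_mod_cast hjpos, hget⟩]
      rw [ih, bisect_pred_pt dst hlt m ((hmem m).mpr hm)]
      congr 1
      omega
  | case2 m h0 hm =>
      rw [altWalk, dif_neg]
      rintro ⟨-, -, hget⟩
      exact hm ((hmem m).mp (PySem.List.mem_of_pyGet?_eq_some _ hget))
  | case3 m h0 =>
      rw [altWalk, dif_neg (fun h => h0 h.1)]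

-- the binary searches run in lockstep; A finishes inside the loop, B finishes outside
theorem loop_eq (remove : List Int) (half lo hi : Int) :
    pyLoop remove half lo hi
      = match altSearch (PySem.List.sorted remove (fun x => x)) half lo hi with
        | none => 0
        | some m => altWalk (PySem.List.sorted (PySem.Set.ofList remove) (fun x => x)) m
            (PySem.List.bisectRight (PySem.List.sorted (PySem.Set.ofList remove) (fun x => x)) m) := by
  have hwalk : ∀ m : Int, pyDescend remove m
      = altWalk (PySem.List.sorted (PySem.Set.ofList remove) (fun x => x)) m
          (PySem.List.bisectRight (PySem.List.sorted (PySem.Set.ofList remove) (fun x => x)) m) :=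
    walk_eq remove _ (PySem.List.sorted_ofList_pairwise_lt remove)
      (fun x => (PySem.List.mem_sorted _ _ _ _).trans (PySem.Set.mem_ofList remove x))
  fun_induction pyLoop remove half lo hi with
  | case1 lo hi h m left heq =>
      have heq' : m + 1 - ((remove.filter (fun v => decide (v ≤ m))).length : Int) = half := by
        simpa [left, ← List.countP_eq_length_filter, List.countP_attach (p := fun v => decide (v ≤ m))] using heq
      have hb := bisect_count remove m
      have hm : m = PySem.Int.floordiv (lo + hi) 2 := rfl
      rw [altSearch, dif_neg (by omega)]
      simp only [← mid_eq]
      rw [← hm]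
      split_ifs <;> first | exact hwalk _ | (exfalso; omega)
  | case2 lo hi h m left hne hgt ih =>
      have hne' : ¬ m + 1 - ((remove.filter (fun v => decide (v ≤ m))).length : Int) = half := by
        simpa [left, ← List.countP_eq_length_filter, List.countP_attach (p := fun v => decide (v ≤ m))] using hne
      have hgt' : m + 1 - ((remove.filter (fun v => decide (v ≤ m))).length : Int) > half := by
        simpa [left, ← List.countP_eq_length_filter, List.countP_attach (p := fun v => decide (v ≤ m))] using hgt
      have hb := bisect_count remove m
      have hm : m = PySem.Int.floordiv (lo + hi) 2 := rfl
      rw [altSearch, dif_neg (by omega)]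
      simp only [← mid_eq]
      rw [← hm]
      split_ifs <;> first | exact ih | (exfalso; omega)
  | case3 lo hi h m left hne hle ih =>
      have hne' : ¬ m + 1 - ((remove.filter (fun v => decide (v ≤ m))).length : Int) = half := by
        simpa [left, ← List.countP_eq_length_filter, List.countP_attach (p := fun v => decide (v ≤ m))] using hne
      have hle' : ¬ m + 1 - ((remove.filter (fun v => decide (v ≤ m))).length : Int) > half := by
        simpa [left, ← List.countP_eq_length_filter, List.countP_attach (p := fun v => decide (v ≤ m))] using hle
      have hb := bisect_count remove m
      have hm : m = PySem.Int.floordiv (lo + hi) 2 := rfl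
      rw [altSearch, dif_neg (by omega)]
      simp only [← mid_eq]
      rw [← hm]
      split_ifs <;> first | exact ih | (exfalso; omega)
  | case4 lo hi h =>
      rw [altSearch, dif_pos (by omega)]

-- ===== VERDICT (by name: the statement is the Claim_ definition above) =====
theorem solve_spec : Claim_equal_solve := by
  intro bits remove _ _
  unfold Spec_solve solve solve_alt
  exact loop_eq remove _ _ _
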